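-- pv_equiv track=rewrite | github.com/VerstraeteBert/algos-ds | test/vraag4/src/yahtzee/126.py | max_gelijk
-- ===== SOURCE A (Python) =====
-- def max_gelijk(stenen):
--     stenen.sort()
--     bib = {}
--     waarden = []
--     for i in stenen:
--         bib[i] = stenen.count(i)
--     for i in bib.values():
--         waarden.append(i)
--     waarden.sort()
--     return waarden[-1]
-- ===== SOURCE B (Python) =====
-- def max_gelijk(stenen):
--     stenen.sort()
--     waarden = []
--     run = 0
--     prev = None
--     for x in stenen:
--         if run and x != prev:
--             waarden.append(run)
--             run = 0
--         run += 1
--         prev = x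
--     if run:
--         waarden.append(run)
--     waarden.sort()
--     return waarden[-1]
-- ===== Notes on version B (the rewrite author's own statement) =====
-- stated objective: faster
-- what changed: Replaces the dict built with a quadratic per-element stenen.count(i) scan by a single linear pass over the sorted list that collects the lengths of consecutive equal runs.
import Mathlib
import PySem

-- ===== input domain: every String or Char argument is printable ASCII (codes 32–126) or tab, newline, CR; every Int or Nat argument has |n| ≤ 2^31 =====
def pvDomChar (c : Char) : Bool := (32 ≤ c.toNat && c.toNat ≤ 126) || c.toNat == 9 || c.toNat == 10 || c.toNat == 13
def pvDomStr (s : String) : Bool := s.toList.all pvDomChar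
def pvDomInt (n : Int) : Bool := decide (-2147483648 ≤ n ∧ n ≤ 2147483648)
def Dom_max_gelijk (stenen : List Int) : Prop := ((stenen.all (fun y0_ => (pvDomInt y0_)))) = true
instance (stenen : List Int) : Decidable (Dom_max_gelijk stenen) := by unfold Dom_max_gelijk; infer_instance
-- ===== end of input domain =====

-- B replaces A's quadratic dict-of-counts (stenen.count per element) by one linear run-length
-- pass over the sorted list; both A and B sort `stenen` in place (same side effect), and the
-- equivalence proved here is about the return value.

-- ===== PORT A =====
def max_gelijk (stenen : List Int) : Int :=
  let s := PySem.List.sorted stenen (fun x => x) false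
  let bib := s.foldl (fun (d : PySem.Dict Int Int) i => d.insert i ((PySem.List.count s i : Int))) PySem.Dict.empty
  let waarden := (PySem.Dict.values bib).foldl (fun w i => w ++ [i]) ([] : List Int)
  let ws := PySem.List.sorted waarden (fun x => x) false
  (PySem.List.pyGet? ws (-1)).getD 0

-- ===== PORT B =====
def max_gelijk_alt (stenen : List Int) : Int :=
  let s := PySem.List.sorted stenen (fun x => x) false
  let st := s.foldl (fun (st : List Int × Int × Option Int) x =>
      let p := if st.2.1 ≠ 0 ∧ some x ≠ st.2.2 then (st.1 ++ [st.2.1], (0 : Int)) else (st.1, st.2.1)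
      (p.1, p.2 + 1, some x)) (([] : List Int), (0 : Int), (none : Option Int))
  let waarden := if st.2.1 ≠ 0 then st.1 ++ [st.2.1] else st.1
  let ws := PySem.List.sorted waarden (fun x => x) false
  (PySem.List.pyGet? ws (-1)).getD 0

-- ===== PRECONDITION & SPEC =====
-- Pre_ excludes only the empty list, on which A (waarden[-1]) raises IndexError (B raises too).
def Pre_max_gelijk (stenen : List Int) : Prop := stenen ≠ []
instance (stenen : List Int) : Decidable (Pre_max_gelijk stenen) := by unfold Pre_max_gelijk; infer_instance
def pvWitness_max_gelijk : List Int := ([1, 2, 2] : List Int)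

def Spec_max_gelijk (stenen : List Int) (out : Int) : Prop := out = max_gelijk_alt stenen
instance (stenen : List Int) (out : Int) : Decidable (Spec_max_gelijk stenen out) := by unfold Spec_max_gelijk; infer_instance

-- ===== CLAIM (what is proved, stated in full; the proofs are below) =====
def Claim_equal_max_gelijk : Prop := ∀ (stenen : List Int), Dom_max_gelijk stenen → Pre_max_gelijk stenen → Spec_max_gelijk stenen (max_gelijk stenen)

-- ===== LEMMAS AND PROOFS =====

-- run lengths of maximal blocks of adjacent equal elements (the common value both ports compute)
def runsAux (a k : Int) : List Int → List Int
  | [] => [k]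
  | b :: t => if b = a then runsAux a (k + 1) t else k :: runsAux b 1 t

def runs : List Int → List Int
  | [] => []
  | a :: t => runsAux a 1 t

-- ---- Set.ofList structure ----
lemma update_cons_of_not_mem (m : List Int) : ∀ (s : List Int) (b : Int), b ∉ m → b ∉ s →
    PySem.Set.update (b :: s) m = b :: PySem.Set.update s m := by
  induction m with
  | nil => intro s b _ _; rfl
  | cons x m ih =>
    intro s b hbm hbs
    have hxb : x ≠ b := by intro h; exact hbm (h ▸ List.mem_cons_self)
    show PySem.Set.update (PySem.Set.add (b :: s) x) m = b :: PySem.Set.update (PySem.Set.add s x) m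
    by_cases hx : x ∈ s
    · have hc1 : PySem.Set.contains (b :: s) x = true := by simp [PySem.Set.contains, hx]
      have hc2 : PySem.Set.contains s x = true := by simp [PySem.Set.contains, hx]
      simp only [PySem.Set.add, hc1, hc2, if_true]
      exact ih s b (fun h => hbm (List.mem_cons_of_mem _ h)) hbs
    · have hc1 : PySem.Set.contains (b :: s) x = false := by simp [PySem.Set.contains, hx, hxb]
      have hc2 : PySem.Set.contains s x = false := by simp [PySem.Set.contains, hx]
      simp only [PySem.Set.add, hc1, hc2, Bool.false_eq_true, if_false, List.cons_append]
      refine ih (s ++ [x]) b (fun h => hbm (List.mem_cons_of_mem _ h)) ?_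
      simp [hbs, Ne.symm hxb]

lemma update_filter_of_mem : ∀ (m : List Int) (s : List Int) (b : Int), b ∈ s →
    PySem.Set.update s m = PySem.Set.update s (m.filter (fun x => x ≠ b)) := by
  intro m
  induction m with
  | nil => intro s b _; rfl
  | cons x m ih =>
    intro s b hb
    by_cases hxb : x = b
    · subst hxb
      have hadd : PySem.Set.add s x = s := by
        simp [PySem.Set.add, PySem.Set.contains, hb]
      show PySem.Set.update (PySem.Set.add s x) m = PySem.Set.update s ((x :: m).filter (fun y => y ≠ x))
      rw [hadd]
      have hfc : (x :: m).filter (fun y => y ≠ x) = m.filter (fun y => y ≠ x) := by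
        simp
      rw [hfc]
      exact ih s x hb
    · show PySem.Set.update (PySem.Set.add s x) m = PySem.Set.update s ((x :: m).filter (fun y => y ≠ b))
      have hfc : (x :: m).filter (fun y => y ≠ b) = x :: m.filter (fun y => y ≠ b) := by
        simp [hxb]
      rw [hfc]
      show _ = PySem.Set.update (PySem.Set.add s x) (m.filter (fun y => y ≠ b))
      exact ih (PySem.Set.add s x) b ((PySem.Set.mem_add s x b).mpr (Or.inl hb))

lemma ofList_cons (b : Int) (l : List Int) :
    PySem.Set.ofList (b :: l) = b :: PySem.Set.ofList (l.filter (fun x => x ≠ b)) := by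
  show PySem.Set.update (PySem.Set.add PySem.Set.empty b) l = _
  have h1 : PySem.Set.add PySem.Set.empty b = [b] := rfl
  rw [h1, update_filter_of_mem l [b] b List.mem_cons_self]
  have h2 : b ∉ l.filter (fun x => x ≠ b) := by simp
  have h3 := update_cons_of_not_mem (l.filter (fun x => x ≠ b)) [] b h2 (by simp)
  simpa [PySem.Set.ofList] using h3

-- ---- A side ----
lemma getD_foldl_insert_const (v : Int → Int) (k dflt : Int) :
    ∀ (l : List Int) (d : PySem.Dict Int Int),
    (l.foldl (fun d x => d.insert x (v x)) d).getD k dflt = if k ∈ l then v k else d.getD k dflt := by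
  intro l
  induction l with
  | nil => intro d; simp
  | cons x l ih =>
    intro d
    simp only [List.foldl_cons, ih, PySem.Dict.getD_insert]
    by_cases h1 : k ∈ l <;> by_cases h2 : k = x <;> simp [h1, h2]

lemma count_tail_eq {v b : Int} (t : List Int) (hvne : v ≠ b) :
    (List.count v (b :: t) : Int) = (List.count v t : Int) := by
  simp [hvne.symm]

lemma map_count_cons_ne (b : Int) (t : List Int) (S : List Int) (hS : ∀ v ∈ S, v ≠ b) :
    S.map (fun v => (List.count v (b :: t) : Int)) = S.map (fun v => (List.count v t : Int)) :=
  List.map_congr_left (fun v hv => count_tail_eq t (hS v hv))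

lemma mem_ofList_filter_ne {v b : Int} {t : List Int}
    (hv : v ∈ PySem.Set.ofList (t.filter (fun x => x ≠ b))) : v ≠ b := by
  have := (PySem.Set.mem_ofList _ v).mp hv
  simpa using (List.mem_filter.mp this).2

lemma runsAux_sorted (t : List Int) : ∀ (a : Int) (k : ℕ),
    (a :: t).Pairwise (· ≤ ·) →
    runsAux a (k : Int) t
      = ((k : Int) + (List.count a t : Int)) :: (PySem.Set.ofList (t.filter (fun x => x ≠ a))).map (fun v => (List.count v t : Int)) := by
  induction t with
  | nil => intro a k _; simp [runsAux, PySem.Set.ofList, PySem.Set.empty]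
  | cons b t ih =>
    intro a k hp
    have hab : a ≤ b := (List.pairwise_cons.mp hp).1 b List.mem_cons_self
    have hpbt : (b :: t).Pairwise (· ≤ ·) := (List.pairwise_cons.mp hp).2
    by_cases hba : b = a
    · subst hba
      have h0 : runsAux b (↑k) (b :: t) = runsAux b ((↑(k + 1) : ℕ) : Int) t := by
        simp [runsAux]
        try push_cast
        try ring_nf
      rw [h0, ih b (k + 1) hpbt]
      have hf : (b :: t).filter (fun x => x ≠ b) = t.filter (fun x => x ≠ b) := by
        simp
      rw [hf]
      refine congrArg₂ (· :: ·) ?_ ?_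
      · push_cast [List.count_cons_self]; ring
      · exact (map_count_cons_ne b t _ (fun v hv => mem_ofList_filter_ne hv)).symm
    · have hlt : a < b := lt_of_le_of_ne hab (fun h => hba h.symm)
      have htgt : ∀ y ∈ t, y ≠ a := by
        intro y hy h
        have hby : b ≤ y := (List.pairwise_cons.mp hpbt).1 y hy
        omega
      have h0 : runsAux a (↑k) (b :: t) = (↑k : Int) :: runsAux b 1 t := by
        simp [runsAux, hba]
      have hca : List.count a (b :: t) = 0 := by
        rw [List.count_eq_zero]
        intro h
        rcases List.mem_cons.mp h with h | h
        · exact hba h.symm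
        · exact htgt a h rfl
      have hft : t.filter (fun x => x ≠ a) = t := by
        apply List.filter_eq_self.mpr
        intro y hy; simpa using htgt y hy
      have hfbt : (b :: t).filter (fun x => x ≠ a) = b :: t := by
        simp only [List.filter_cons]
        have : (decide (b ≠ a)) = true := by simp [hba]
        rw [this, if_pos rfl, hft]
      rw [h0, hca, hfbt, ofList_cons]
      have h1 := ih b 1 hpbt
      rw [show (((1 : ℕ)) : Int) = (1 : Int) by norm_num] at h1
      rw [h1, List.map_cons]
      refine congrArg₂ (· :: ·) ?_ ?_
      · push_cast; ring
      · refine congrArg₂ (· :: ·) ?_ ?_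
        · rw [List.count_cons_self]; push_cast; ring
        · exact (map_count_cons_ne b t _ (fun v hv => mem_ofList_filter_ne hv)).symm

lemma aWaarden_eq_runs (s : List Int) (hs : s.Pairwise (· ≤ ·)) :
    (PySem.Dict.values (s.foldl (fun (d : PySem.Dict Int Int) i => d.insert i ((PySem.List.count s i : Int))) PySem.Dict.empty)).foldl (fun w i => w ++ [i]) ([] : List Int) = runs s := by
  rw [PySem.List.foldl_append_singleton_eq_map (fun i => i)]
  simp only [List.nil_append, List.map_id']
  set bib := s.foldl (fun (d : PySem.Dict Int Int) i => d.insert i ((PySem.List.count s i : Int))) PySem.Dict.empty with hbib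
  have hnd : bib.keys.Nodup := by
    apply PySem.Dict.nodup_keys_foldl_insert
    simp [PySem.Dict.keys_empty]
  have hkeys : bib.keys = PySem.Set.ofList s := by
    rw [hbib, PySem.Dict.keys_foldl_insert]
    simp [PySem.Dict.keys_empty]
    rfl
  rw [PySem.Dict.values_eq_map_keys bib hnd 0, hkeys]
  have hv : ∀ k ∈ PySem.Set.ofList s, bib.getD k 0 = (List.count k s : Int) := by
    intro k hk
    have hks : k ∈ s := (PySem.Set.mem_ofList s k).mp hk
    rw [hbib, getD_foldl_insert_const, if_pos hks, PySem.List.count_eq]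
  rw [List.map_congr_left hv]
  -- now: (ofList s).map (count · s) = runs s
  cases s with
  | nil => simp [runs, PySem.Set.ofList, PySem.Set.empty]
  | cons a t =>
    rw [ofList_cons, runs, List.map_cons]
    have h1 := runsAux_sorted t a 1 hs
    rw [show ((1 : ℕ) : Int) = (1 : Int) by norm_num] at h1
    rw [h1]
    refine congrArg₂ (· :: ·) ?_ ?_
    · rw [List.count_cons_self]; push_cast; ring
    · exact map_count_cons_ne a t _ (fun v hv => mem_ofList_filter_ne hv)

-- ---- B side ----
lemma bfold_runsAux (t : List Int) : ∀ (w : List Int) (a k : Int), 0 < k →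
    (let st := t.foldl (fun (st : List Int × Int × Option Int) x =>
        let p := if st.2.1 ≠ 0 ∧ some x ≠ st.2.2 then (st.1 ++ [st.2.1], (0 : Int)) else (st.1, st.2.1)
        (p.1, p.2 + 1, some x)) (w, k, some a)
     if st.2.1 ≠ 0 then st.1 ++ [st.2.1] else st.1) = w ++ runsAux a k t := by
  induction t with
  | nil => intro w a k hk; simp [runsAux, hk.ne']
  | cons b t ih =>
    intro w a k hk
    by_cases hba : b = a
    · subst hba
      simp only [List.foldl_cons, runsAux]
      have h1 : ((if k ≠ 0 ∧ some b ≠ some b then (w ++ [k], (0:Int)) else (w, k)) : List Int × Int) = (w, k) := by simp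
      simp only [h1]
      exact ih w b (k + 1) (by omega)
    · simp only [List.foldl_cons, runsAux, if_neg hba]
      have h1 : ((if k ≠ 0 ∧ some b ≠ some a then (w ++ [k], (0:Int)) else (w, k)) : List Int × Int) = (w ++ [k], 0) := by
        simp [hk.ne', hba]
      simp only [h1]
      have := ih (w ++ [k]) b 1 (by omega)
      simpa using this

lemma bWaarden_eq_runs (s : List Int) :
    (let st := s.foldl (fun (st : List Int × Int × Option Int) x =>
        let p := if st.2.1 ≠ 0 ∧ some x ≠ st.2.2 then (st.1 ++ [st.2.1], (0 : Int)) else (st.1, st.2.1)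
        (p.1, p.2 + 1, some x)) (([] : List Int), (0 : Int), (none : Option Int))
     if st.2.1 ≠ 0 then st.1 ++ [st.2.1] else st.1) = runs s := by
  cases s with
  | nil => simp [runs]
  | cons a t =>
    simp only [List.foldl_cons, runs]
    have h1 : ((if (0:Int) ≠ 0 ∧ some a ≠ (none : Option Int) then (([]:List Int) ++ [(0:Int)], (0:Int)) else (([]:List Int), (0:Int))) : List Int × Int) = ([], 0) := by simp
    simp only [h1]
    have := bfold_runsAux t [] a 1 (by omega)
    simpa using this

-- ===== VERDICT (by name: the statement is the Claim_ definition above) =====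
theorem max_gelijk_spec : Claim_equal_max_gelijk := by
  intro stenen _ _
  unfold Spec_max_gelijk max_gelijk max_gelijk_alt
  have hs : (PySem.List.sorted stenen (fun x => x) false).Pairwise (· ≤ ·) :=
    PySem.List.sorted_pairwise stenen (fun x => x)
  show (PySem.List.pyGet? (PySem.List.sorted ((PySem.Dict.values ((PySem.List.sorted stenen (fun x => x) false).foldl (fun (d : PySem.Dict Int Int) i => d.insert i ((PySem.List.count (PySem.List.sorted stenen (fun x => x) false) i : Int))) PySem.Dict.empty)).foldl (fun w i => w ++ [i]) ([] : List Int)) (fun x => x) false) (-1)).getD 0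
      = (PySem.List.pyGet? (PySem.List.sorted (let st := (PySem.List.sorted stenen (fun x => x) false).foldl (fun (st : List Int × Int × Option Int) x => let p := if st.2.1 ≠ 0 ∧ some x ≠ st.2.2 then (st.1 ++ [st.2.1], (0 : Int)) else (st.1, st.2.1); (p.1, p.2 + 1, some x)) (([] : List Int), (0 : Int), (none : Option Int)); if st.2.1 ≠ 0 then st.1 ++ [st.2.1] else st.1) (fun x => x) false) (-1)).getD 0
  rw [aWaarden_eq_runs _ hs, bWaarden_eq_runs]
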